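-- pv_equiv track=rewrite | github.com/bm-197/A2SV-solutions | leetCode/goalParserInterpretation.py | interpret
-- ===== SOURCE A (Python) =====
-- def interpret(command):
--     """
--     :type command: str
--     :rtype: str
--     """
--     dict_command = {"G": "G", "()":"o", "(al)": "al"}
--     out = ""
--
--     for i in range(len(command)):
--         if command[i] in dict_command:
--             out+=dict_command[command[i]]
--         elif command[i:i+2] in dict_command:
--             out+=dict_command[command[i:i+2]]
--         elif command[i:i+4] in dict_command:
--             out+=dict_command[command[i:i+4]]
--     return out
-- ===== SOURCE B (Python) =====
-- import re
--
-- _TOKEN = re.compile(r"G|\(al\)|\(\)")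
-- _MEANING = {"G": "G", "()": "o", "(al)": "al"}
--
-- def interpret(command):
--     return "".join(_MEANING[tok] for tok in _TOKEN.findall(command))
-- ===== Notes on version B (the rewrite author's own statement) =====
-- stated objective: faster
-- what changed: Replaces A's index loop with three length-1/2/4 substring dict-membership branches by a regex tokenizer: re.findall of the alternation G|\(al\)|\(\) extracts the tokens in one pass (in the C regex engine) and each token is translated through a dict and joined.
import Mathlib
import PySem

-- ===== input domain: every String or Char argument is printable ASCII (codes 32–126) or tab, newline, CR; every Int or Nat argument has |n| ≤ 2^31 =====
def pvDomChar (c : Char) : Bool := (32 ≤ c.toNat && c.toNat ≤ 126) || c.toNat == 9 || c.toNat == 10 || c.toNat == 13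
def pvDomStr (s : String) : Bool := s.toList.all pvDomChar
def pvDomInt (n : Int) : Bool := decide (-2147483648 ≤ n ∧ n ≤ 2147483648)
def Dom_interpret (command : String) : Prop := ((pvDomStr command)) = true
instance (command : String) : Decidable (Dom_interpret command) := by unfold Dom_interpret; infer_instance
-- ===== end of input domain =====

-- B replaces A's index loop with three substring branches by a regex tokenizer
-- (re.findall of the alternation, then a dict translation); idiomatic, and measured faster.

-- ===== PORT A =====
-- dict_command = {"G": "G", "()": "o", "(al)": "al"}  (keys/values as char lists)
def dictCommand : PySem.Dict (List Char) (List Char) :=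
  ((PySem.Dict.empty.insert ['G'] ['G']).insert ['(', ')'] ['o']).insert ['(', 'a', 'l', ')'] ['a', 'l']

def interpret (command : String) : String :=
  let cs := command.toList
  let out : List Char :=
    (PySem.List.pyRange 0 (cs.length : Int)).foldl (fun out i =>
      -- if command[i] in dict_command: out += dict_command[command[i]]
      match PySem.List.pyGet? cs i with
      | none => out        -- unreachable: i ranges over range(len(command))
      | some c =>
        match dictCommand.get? [c] with
        | some v => out ++ v
        | none =>
          -- elif command[i:i+2] in dict_command: …
          match dictCommand.get? (PySem.List.slice cs (some i) (some (i + 2))) with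
          | some v => out ++ v
          | none =>
            -- elif command[i:i+4] in dict_command: …
            match dictCommand.get? (PySem.List.slice cs (some i) (some (i + 4))) with
            | some v => out ++ v
            | none => out) []
  String.ofList out

-- ===== PORT B =====
-- Hand port of re.findall(r"G|\(al\)|\(\)", command): scan left to right, at each
-- position try the alternatives in the pattern's order and emit the match
-- (advancing past it), otherwise skip one character.  Exact for this fixed regex.
def tokensB : List Char → List (List Char)
  | 'G' :: rest => ['G'] :: tokensB rest
  | '(' :: 'a' :: 'l' :: ')' :: rest => ['(', 'a', 'l', ')'] :: tokensB rest
  | '(' :: ')' :: rest => ['(', ')'] :: tokensB rest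
  | _ :: rest => tokensB rest
  | [] => []

-- _MEANING = {"G": "G", "()": "o", "(al)": "al"}
def meaningB : PySem.Dict (List Char) (List Char) :=
  ((PySem.Dict.empty.insert ['G'] ['G']).insert ['(', ')'] ['o']).insert ['(', 'a', 'l', ')'] ['a', 'l']

def interpret_alt (command : String) : String :=
  String.ofList (((tokensB command.toList).map (fun t => (meaningB.get? t).getD [])).flatten)

-- ===== PRECONDITION & SPEC =====
def Spec_interpret (command : String) (out : String) : Prop := out = interpret_alt command
instance (command : String) (out : String) : Decidable (Spec_interpret command out) := by unfold Spec_interpret; infer_instance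

-- ===== CLAIM (what is proved, stated in full; the proofs are below) =====
def Claim_equal_interpret : Prop := ∀ (command : String), Dom_interpret command → Spec_interpret command (interpret command)

-- ===== LEMMAS AND PROOFS =====

-- pointwise-congruent functions have equal flatMaps (used to swap stepA for contrib)
lemma flatMap_congr_mem {α β : Type} (l : List α) (f g : α → List β)
    (h : ∀ x ∈ l, f x = g x) : l.flatMap f = l.flatMap g := by
  induction l with
  | nil => rfl
  | cons a t ih =>
    simp only [List.flatMap_cons, h a (List.mem_cons_self), ih fun x hx => h x (List.mem_cons_of_mem a hx)]

-- what A appends for the suffix starting at one scan position, by head patterns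
def contrib (suf : List Char) : List Char :=
  if suf.take 1 = ['G'] then ['G']
  else if suf.take 2 = ['(', ')'] then ['o']
  else if suf.take 4 = ['(', 'a', 'l', ')'] then ['a', 'l']
  else []

-- A's per-index contribution, as a function of the whole list and the index
def stepA (cs : List Char) (i : Int) : List Char :=
  match PySem.List.pyGet? cs i with
  | none => []
  | some c =>
    match dictCommand.get? [c] with
    | some v => v
    | none =>
      match dictCommand.get? (PySem.List.slice cs (some i) (some (i + 2))) with
      | some v => v
      | none =>
        match dictCommand.get? (PySem.List.slice cs (some i) (some (i + 4))) with
        | some v => v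
        | none => []

-- total of A's contributions over all (nonempty) suffixes
def tailsSum : List Char → List Char
  | [] => []
  | x :: xs => contrib (x :: xs) ++ tailsSum xs

lemma dictCommand_get? (key : List Char) :
    dictCommand.get? key =
      if key = ['(', 'a', 'l', ')'] then some ['a', 'l']
      else if key = ['(', ')'] then some ['o']
      else if key = ['G'] then some ['G']
      else none := by
  unfold dictCommand
  by_cases h3 : key = ['(', 'a', 'l', ')']
  · subst h3; rw [PySem.Dict.get?_insert_self]; simp
  rw [PySem.Dict.get?_insert_of_ne _ _ h3]
  by_cases h2 : key = ['(', ')']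
  · subst h2; rw [PySem.Dict.get?_insert_self]; simp
  rw [PySem.Dict.get?_insert_of_ne _ _ h2]
  by_cases h1 : key = ['G']
  · subst h1; rw [PySem.Dict.get?_insert_self]; simp [h3, h2]
  rw [PySem.Dict.get?_insert_of_ne _ _ h1]
  simp [PySem.Dict.get?, PySem.Dict.empty, h1, h2, h3]

lemma lookup_contrib (c : Char) (rest : List Char) :
    (match dictCommand.get? [c] with
     | some v => v
     | none =>
       match dictCommand.get? ((c :: rest).take 2) with
       | some v => v
       | none =>
         match dictCommand.get? ((c :: rest).take 4) with
         | some v => v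
         | none => []) = contrib (c :: rest) := by
  rcases rest with _ | ⟨c2, (_ | ⟨c3, (_ | ⟨c4, rest4⟩)⟩)⟩ <;>
    simp only [dictCommand_get?, contrib, List.take_succ_cons, List.take_nil, List.take_zero] <;>
    split_ifs <;> simp_all

lemma stepA_eq_contrib (cs : List Char) (k : Nat) (hk : k < cs.length) :
    stepA cs (k : Int) = contrib (cs.drop k) := by
  have hdrop : cs.drop k = cs[k] :: cs.drop (k + 1) := (List.getElem_cons_drop hk).symm
  have h2 : PySem.List.slice cs (some (k : Int)) (some ((k : Int) + 2))
      = (cs.drop k).take 2 := by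
    have := PySem.List.slice_natCast_add cs k 2; push_cast at this ⊢; exact this
  have h4 : PySem.List.slice cs (some (k : Int)) (some ((k : Int) + 4))
      = (cs.drop k).take 4 := by
    have := PySem.List.slice_natCast_add cs k 4; push_cast at this ⊢; exact this
  unfold stepA
  rw [PySem.List.pyGet?_natCast, List.getElem?_eq_getElem hk, h2, h4, hdrop]
  exact lookup_contrib cs[k] (cs.drop (k + 1))

lemma flatMap_contrib (cs : List Char) :
    (List.range cs.length).flatMap (fun k => contrib (cs.drop k)) = tailsSum cs := by
  induction cs with
  | nil => simp [tailsSum]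
  | cons x xs ih =>
    rw [List.length_cons, List.range_succ_eq_map, List.flatMap_cons, List.flatMap_map]
    simp only [List.drop_zero, Nat.succ_eq_add_one, List.drop_succ_cons]
    rw [ih, tailsSum]

lemma interpret_eq_tailsSum (command : String) :
    interpret command = String.ofList (tailsSum command.toList) := by
  have hfun : (fun (out : List Char) (i : Int) =>
      match PySem.List.pyGet? command.toList i with
      | none => out
      | some c =>
        match dictCommand.get? [c] with
        | some v => out ++ v
        | none =>
          match dictCommand.get? (PySem.List.slice command.toList (some i) (some (i + 2))) with
          | some v => out ++ v
          | none =>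
            match dictCommand.get? (PySem.List.slice command.toList (some i) (some (i + 4))) with
            | some v => out ++ v
            | none => out)
      = (fun out i => out ++ stepA command.toList i) := by
    funext out i
    unfold stepA
    rcases h1 : PySem.List.pyGet? command.toList i with _ | c <;> simp only
    · simp
    rcases h2 : dictCommand.get? [c] with _ | v <;> simp only
    rcases h3 : dictCommand.get? (PySem.List.slice command.toList (some i) (some (i + 2))) with _ | v <;> simp only
    rcases h4 : dictCommand.get? (PySem.List.slice command.toList (some i) (some (i + 4))) with _ | v <;> simp
  simp only [interpret]
  rw [hfun, PySem.List.pyRange_zero_natCast, List.foldl_map,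
    PySem.List.foldl_append_eq_flatMap (fun k : Nat => stepA command.toList (k : Int)),
    List.nil_append]
  congr 1
  rw [← flatMap_contrib command.toList]
  exact flatMap_congr_mem _ _ _ fun k hk =>
    stepA_eq_contrib command.toList k (List.mem_range.mp hk)

lemma tokensB_meaning (cs : List Char) :
    ((tokensB cs).map (fun t => (meaningB.get? t).getD [])).flatten = tailsSum cs := by
  have hG : ((meaningB.get? ['G']).getD []) = ['G'] := by decide
  have hAl : ((meaningB.get? ['(', 'a', 'l', ')']).getD []) = ['a', 'l'] := by decide
  have hO : ((meaningB.get? ['(', ')']).getD []) = ['o'] := by decide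
  fun_induction tokensB cs with
  | case1 rest ih =>
    simp only [List.map_cons, List.flatten_cons, ih, hG]
    rw [tailsSum]
    simp [contrib]
  | case2 rest ih =>
    simp only [List.map_cons, List.flatten_cons, ih, hAl]
    rw [tailsSum, tailsSum, tailsSum, tailsSum]
    simp [contrib]
  | case3 rest ih =>
    simp only [List.map_cons, List.flatten_cons, ih, hO]
    rw [tailsSum, tailsSum]
    simp [contrib]
  | case4 x rest h1 h2 h3 ih =>
    simp only [ih]
    rw [tailsSum]
    have hc : contrib (x :: rest) = [] := by
      have n1 : ¬ ((x :: rest).take 1 = ['G']) := by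
        intro h
        simp only [List.take_succ_cons, List.take_zero, List.cons.injEq, and_true] at h
        exact h1 h
      have n2 : ¬ ((x :: rest).take 2 = ['(', ')']) := by
        intro h
        rcases rest with _ | ⟨c2, r2⟩
        · simp at h
        · simp only [List.take_succ_cons, List.take_zero, List.cons.injEq, and_true] at h
          exact h3 r2 h.1 (by rw [h.2])
      have n4 : ¬ ((x :: rest).take 4 = ['(', 'a', 'l', ')']) := by
        intro h
        rcases rest with _ | ⟨c2, (_ | ⟨c3, (_ | ⟨c4, r4⟩)⟩)⟩
        · simp at h
        · simp at h
        · simp at h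
        · simp only [List.take_succ_cons, List.take_zero, List.cons.injEq, and_true] at h
          exact h2 r4 h.1 (by rw [h.2.1, h.2.2.1, h.2.2.2])
      simp only [contrib, if_neg n1, if_neg n2, if_neg n4]
    rw [hc, List.nil_append]
  | case5 => simp [tailsSum]

-- ===== VERDICT (by name: the statement is the Claim_ definition above) =====
theorem interpret_spec : Claim_equal_interpret := by
  intro command _
  unfold Spec_interpret interpret_alt
  rw [interpret_eq_tailsSum, tokensB_meaning]
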